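-- pv_equiv track=rewrite | github.com/benquick123/code-profiling | code/batch-1/vse-naloge-brez-testov/DN6-M-48.py | prvi_tvit
-- ===== SOURCE A (Python) =====
-- def avtor(tvit):
--     return tvit.split(":")[0]
--
-- def besedilo(tvit):
--     return ": ".join(tvit.split(": ")[1:])
--
-- def prvi_tvit(tviti):
--     slovar = {}
--     for tvit in tviti:
--         pisec = avtor(tvit)
--         tekst = besedilo(tvit)
--         if pisec not in slovar:
--             slovar[pisec] = tekst
--     return slovar
-- ===== SOURCE B (Python) =====
-- def avtor(tvit):
--     return tvit.split(":")[0]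
--
-- def besedilo(tvit):
--     return ": ".join(tvit.split(": ")[1:])
--
-- def prvi_tvit(tviti):
--     po_avtorjih = {}
--     for tvit in tviti:
--         po_avtorjih.setdefault(avtor(tvit), []).append(besedilo(tvit))
--     return {a: besedila[0] for a, besedila in po_avtorjih.items()}
-- ===== Notes on version B (the rewrite author's own statement) =====
-- stated objective: alternative
-- what changed: B groups all tweet texts by author in one pass (the dict-of-lists setdefault/append grouping idiom) and then takes the first text of each group, instead of A's single pass over a str-to-str dict guarded by 'if pisec not in slovar'.
import Mathlib
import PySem

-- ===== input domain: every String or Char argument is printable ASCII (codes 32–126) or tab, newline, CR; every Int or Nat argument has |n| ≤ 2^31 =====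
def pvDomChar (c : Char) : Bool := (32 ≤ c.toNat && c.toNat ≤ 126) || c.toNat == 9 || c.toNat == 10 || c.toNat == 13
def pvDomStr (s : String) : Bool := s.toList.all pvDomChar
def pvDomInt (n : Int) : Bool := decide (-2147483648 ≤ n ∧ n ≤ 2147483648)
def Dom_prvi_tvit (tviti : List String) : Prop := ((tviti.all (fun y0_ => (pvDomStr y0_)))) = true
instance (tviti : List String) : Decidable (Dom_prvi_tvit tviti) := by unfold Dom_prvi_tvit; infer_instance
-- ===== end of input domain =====

-- B groups all tweet texts by author in one pass and then takes the first text of each group,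
-- instead of A's guarded single-pass str-to-str dict fill (alternative decomposition).

-- ===== PORT A =====
-- shared helpers: both Python files contain the identical avtor/besedilo helpers
-- tvit.split(":")[0]; split with a nonempty separator is never empty, so the [0] never raises (getD "" unreachable)
def avtorP (tvit : String) : String :=
  (PySem.List.pyGet? ((PySem.Str.split? tvit ":").getD []) 0).getD ""

-- ": ".join(tvit.split(": ")[1:])
def besediloP (tvit : String) : String :=
  PySem.Str.join ": " (PySem.List.slice ((PySem.Str.split? tvit ": ").getD []) (some 1) none)

def prvi_tvit (tviti : List String) : List (String × String) :=
  (tviti.foldl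
    (fun (slovar : PySem.Dict String String) tvit =>
      let pisec := avtorP tvit
      let tekst := besediloP tvit
      if slovar.contains pisec then slovar else slovar.insert pisec tekst)
    PySem.Dict.empty).items

-- ===== PORT B =====
-- po_avtorjih.setdefault(avtor(tvit), []).append(besedilo(tvit)) sets
-- po_avtorjih[k] = po_avtorjih.get(k, []) + [x], i.e. Dict.modify k [] (· ++ [x]);
-- every group is nonempty, so besedila[0] never raises (the getD "" default is unreachable)
def prvi_tvit_alt (tviti : List String) : List (String × String) :=
  let po_avtorjih := tviti.foldl
    (fun (d : PySem.Dict String (List String)) tvit =>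
      d.modify (avtorP tvit) [] (· ++ [besediloP tvit]))
    PySem.Dict.empty
  (po_avtorjih.items.foldl
    (fun (d : PySem.Dict String String) p =>
      d.insert p.1 ((PySem.List.pyGet? p.2 0).getD ""))
    PySem.Dict.empty).items

-- ===== PRECONDITION & SPEC =====
def Spec_prvi_tvit (tviti : List String) (out : List (String × String)) : Prop := out = prvi_tvit_alt tviti
instance (tviti : List String) (out : List (String × String)) : Decidable (Spec_prvi_tvit tviti out) := by unfold Spec_prvi_tvit; infer_instance

-- ===== CLAIM (what is proved, stated in full; the proofs are below) =====
def Claim_equal_prvi_tvit : Prop := ∀ (tviti : List String), Dom_prvi_tvit tviti → Spec_prvi_tvit tviti (prvi_tvit tviti)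

-- ===== LEMMAS AND PROOFS =====

-- the text of the first tweet in tviti whose author is a
def prviZ (tviti : List String) (a : String) : String :=
  (besediloP <$> tviti.find? (fun t => avtorP t == a)).getD ""

-- the common target: items are the deduplicated authors paired with the text of their first tweet
def pvTarget (full xs : List String) : List (String × String) :=
  (PySem.List.dedup (xs.map avtorP)).map (fun a => (a, prviZ full a))

-- head of a filter is find?
lemma pvHead_filter {α : Type} (p : α → Bool) (l : List α) :
    (l.filter p).head? = l.find? p := by
  induction l with
  | nil => rfl
  | cons x xs ih =>
    by_cases h : p x
    · simp [h]
    · simp [h, ih]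

-- the grouping dict of B
def pvPo (tviti : List String) : PySem.Dict String (List String) :=
  tviti.foldl
    (fun (d : PySem.Dict String (List String)) tvit =>
      d.modify (avtorP tvit) [] (· ++ [besediloP tvit]))
    PySem.Dict.empty

lemma pvPo_keys (tviti : List String) :
    (pvPo tviti).keys = PySem.List.dedup (tviti.map avtorP) := by
  unfold pvPo
  rw [PySem.Dict.keys_foldl_modify_key]
  rw [show (PySem.Dict.empty : PySem.Dict String (List String)).keys = [] from rfl]
  rw [PySem.List.dedup_eq_ofList, PySem.Set.ofList_eq_foldl]
  rfl

lemma pvPo_getD (tviti : List String) (a : String) :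
    (pvPo tviti).getD a [] = (tviti.filter (fun t => avtorP t == a)).map besediloP := by
  unfold pvPo
  have hmap : tviti.foldl
      (fun (d : PySem.Dict String (List String)) tvit =>
        d.modify (avtorP tvit) [] (· ++ [besediloP tvit]))
      PySem.Dict.empty
    = (tviti.map (fun t => (avtorP t, besediloP t))).foldl
      (fun (d : PySem.Dict String (List String)) p => d.modify p.1 [] (· ++ [p.2]))
      PySem.Dict.empty := by rw [List.foldl_map]
  rw [hmap, PySem.Dict.getD_foldl_modify_append]
  rw [show (PySem.Dict.empty : PySem.Dict String (List String)).getD a [] = [] from rfl,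
    List.nil_append, List.filter_map, List.map_map]
  rfl

lemma pvB_eq_target (tviti : List String) : prvi_tvit_alt tviti = pvTarget tviti tviti := by
  show ((pvPo tviti).items.foldl
      (fun (d : PySem.Dict String String) p =>
        d.insert p.1 ((PySem.List.pyGet? p.2 0).getD ""))
      PySem.Dict.empty).items = pvTarget tviti tviti
  have hnd : (pvPo tviti).keys.Nodup := by
    rw [pvPo_keys]; exact PySem.List.nodup_dedup _
  have hfresh := PySem.Dict.items_foldl_insert_fresh
      (l := (pvPo tviti).items)
      (k := fun p : String × List String => p.1)
      (v := fun p : String × List String => (PySem.List.pyGet? p.2 0).getD "")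
      (d := (PySem.Dict.empty : PySem.Dict String String))
      (fun p _ => rfl) hnd
  rw [hfresh]
  · rw [show (PySem.Dict.empty : PySem.Dict String String).items = [] from rfl, List.nil_append]
    rw [PySem.Dict.items_eq_map_keys (pvPo tviti) hnd [], List.map_map, pvPo_keys]
    unfold pvTarget
    refine List.map_congr_left (fun a _ => ?_)
    simp only [Function.comp]
    rw [pvPo_getD]
    congr 1
    rw [show ∀ l : List String, PySem.List.pyGet? l 0 = l.head? from fun l => by
      cases l <;> simp [PySem.List.pyGet?, PySem.List.pyIdx?]]
    rw [List.head?_map, pvHead_filter]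
    rfl

lemma pvOfList_append (xs : List String) (x : String) :
    PySem.Set.ofList (xs ++ [x]) = PySem.Set.add (PySem.Set.ofList xs) x := by
  rw [PySem.Set.ofList_eq_foldl, List.foldl_append]; rfl

lemma pvDedup_append_mem {xs : List String} {x : String} (h : x ∈ xs) :
    PySem.List.dedup (xs ++ [x]) = PySem.List.dedup xs := by
  simp only [PySem.List.dedup_eq_ofList, pvOfList_append]
  exact PySem.Set.add_of_mem ((PySem.Set.mem_ofList _ _).2 h)

lemma pvDedup_append_not_mem {xs : List String} {x : String} (h : x ∉ xs) :
    PySem.List.dedup (xs ++ [x]) = PySem.List.dedup xs ++ [x] := by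
  simp only [PySem.List.dedup_eq_ofList, pvOfList_append]
  exact PySem.Set.add_of_not_mem (fun hm => h ((PySem.Set.mem_ofList _ _).1 hm))

-- the loop invariant for A's fold
lemma pvA_loop (full : List String) :
    ∀ (ts pre : List String) (d : PySem.Dict String String),
      full = pre ++ ts → d.items = pvTarget full pre →
      (ts.foldl
        (fun (slovar : PySem.Dict String String) tvit =>
          let pisec := avtorP tvit
          let tekst := besediloP tvit
          if slovar.contains pisec then slovar else slovar.insert pisec tekst)
        d).items = pvTarget full full := by
  intro ts
  induction ts with
  | nil => intro pre d hfull hd; simp at hfull; simpa [hfull] using hd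
  | cons t ts ih =>
    intro pre d hfull hd
    have hkeys : d.keys = PySem.List.dedup (pre.map avtorP) := by
      show d.items.map Prod.fst = _
      rw [hd]; unfold pvTarget; rw [List.map_map]
      rw [show (Prod.fst ∘ fun a : String => (a, prviZ full a)) = fun a => a from rfl]
      exact List.map_id' _
    have hcontains : d.contains (avtorP t) = decide (avtorP t ∈ pre.map avtorP) := by
      rw [PySem.Dict.contains_eq_decide_mem_keys, hkeys]
      simp
    simp only [List.foldl_cons]
    by_cases hmem : avtorP t ∈ pre.map avtorP
    · have : d.contains (avtorP t) = true := by simp [hcontains, hmem]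
      simp only [this, if_true]
      exact ih (pre ++ [t]) d (by simp [hfull]) (by
        rw [hd]; unfold pvTarget
        rw [show (pre ++ [t]).map avtorP = pre.map avtorP ++ [avtorP t] by simp]
        rw [pvDedup_append_mem hmem])
    · have : d.contains (avtorP t) = false := by simp [hcontains, hmem]
      simp only [this, Bool.false_eq_true, if_false]
      refine ih (pre ++ [t]) _ (by simp [hfull]) ?_
      rw [PySem.Dict.items_insert_of_not_contains _ _ this, hd]
      unfold pvTarget
      rw [show (pre ++ [t]).map avtorP = pre.map avtorP ++ [avtorP t] by simp]
      rw [pvDedup_append_not_mem hmem, List.map_append]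
      have hfind : full.find? (fun u => avtorP u == avtorP t) = some t := by
        rw [hfull, List.find?_append]
        have h1 : pre.find? (fun u => avtorP u == avtorP t) = none := by
          rw [List.find?_eq_none]
          intro x hx
          simp only [beq_iff_eq]
          exact fun he => hmem (he ▸ List.mem_map_of_mem hx)
        simp [h1]
      simp [prviZ, hfind]

-- ===== VERDICT (by name: the statement is the Claim_ definition above) =====
theorem prvi_tvit_spec : Claim_equal_prvi_tvit := by
  intro tviti _
  show prvi_tvit tviti = prvi_tvit_alt tviti
  rw [pvB_eq_target]
  unfold prvi_tvit
  exact pvA_loop tviti tviti [] PySem.Dict.empty (by simp) rfl
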